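-- pv_equiv track=rewrite | github.com/Josuee2008/365-python-ejercicios | Semana_33.py | es_numero_espejo
-- ===== SOURCE A (Python) =====
-- def es_numero_espejo(numero):
--     espejo = {"0": "0", "1": "1", "8":"8", "6": "9", "9": "6"}
--
--     num_str = str(numero)
--
--     reflejo = ""
--     for digitos in reversed(num_str):
--         if digitos in espejo:
--             reflejo += espejo[digitos]
--         else:
--             return False
--
--     return reflejo == num_str
-- ===== SOURCE B (Python) =====
-- def es_numero_espejo(numero):
--     espejo = {"0": "0", "1": "1", "8": "8", "6": "9", "9": "6"}
--     s = str(numero)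
--     n = len(s)
--     i = 0
--     while i < n:
--         c = s[n - 1 - i]
--         if c not in espejo:
--             return False
--         if espejo[c] != s[i]:
--             return False
--         i += 1
--     return True
-- ===== Notes on version B (the rewrite author's own statement) =====
-- stated objective: alternative
-- what changed: B replaces A's build-the-mirrored-string-then-compare pass with a two-pointer index loop that compares s[i] with the mirror of s[n-1-i] in place, exiting on the first failure and never constructing the reflected string.
import Mathlib
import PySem

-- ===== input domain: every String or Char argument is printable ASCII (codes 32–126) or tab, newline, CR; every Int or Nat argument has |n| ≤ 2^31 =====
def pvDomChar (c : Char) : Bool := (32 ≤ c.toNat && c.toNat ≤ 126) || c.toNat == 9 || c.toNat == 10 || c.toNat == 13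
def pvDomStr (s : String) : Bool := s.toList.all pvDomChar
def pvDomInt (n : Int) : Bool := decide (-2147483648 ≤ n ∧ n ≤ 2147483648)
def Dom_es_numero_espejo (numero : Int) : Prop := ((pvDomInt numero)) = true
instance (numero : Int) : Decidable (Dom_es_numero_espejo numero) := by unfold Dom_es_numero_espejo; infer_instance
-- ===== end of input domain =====

-- B re-does the mirror check as a two-pointer index loop comparing s[i] with the
-- mirror of s[n-1-i] in place, never building A's reflected string (objective: alternative).

-- ===== PORT A =====
-- A's dict 'espejo' as an Option-valued lookup ('c in espejo' = result is some _)
def pvAMirror (c : Char) : Option Char :=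
  if c = '0' then some '0'
  else if c = '1' then some '1'
  else if c = '8' then some '8'
  else if c = '6' then some '9'
  else if c = '9' then some '6'
  else none

-- A's for-loop over reversed(num_str), accumulating 'reflejo'; none = the early 'return False'
def pvALoop : List Char → List Char → Option (List Char)
  | [], acc => some acc
  | c :: rest, acc =>
    match pvAMirror c with
    | some m => pvALoop rest (acc ++ [m])
    | none => none

def es_numero_espejo (numero : Int) : Bool :=
  let s := (PySem.Int.toStr numero).toList
  match pvALoop s.reverse [] with
  | none => false
  | some r => r == s

-- ===== PORT B =====
-- B's dict 'espejo' (same table, B's own copy)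
def pvBMirror (c : Char) : Option Char :=
  if c = '0' then some '0'
  else if c = '1' then some '1'
  else if c = '8' then some '8'
  else if c = '6' then some '9'
  else if c = '9' then some '6'
  else none

-- B's while-loop: index i, compare mirror of s[n-1-i] with s[i] (indices always in range)
def pvBLoop (s : List Char) (n i : Nat) : Bool :=
  if i < n then
    let c := s.getD (n - 1 - i) ' '
    match pvBMirror c with
    | none => false
    | some m => if m ≠ s.getD i ' ' then false else pvBLoop s n (i + 1)
  else true
termination_by n - i

def es_numero_espejo_alt (numero : Int) : Bool :=
  let s := (PySem.Int.toStr numero).toList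
  pvBLoop s s.length 0

-- ===== PRECONDITION & SPEC =====
def Spec_es_numero_espejo (numero : Int) (out : Bool) : Prop := out = es_numero_espejo_alt numero
instance (numero : Int) (out : Bool) : Decidable (Spec_es_numero_espejo numero out) := by unfold Spec_es_numero_espejo; infer_instance

-- ===== CLAIM (what is proved, stated in full; the proofs are below) =====
def Claim_equal_es_numero_espejo : Prop := ∀ (numero : Int), Dom_es_numero_espejo numero → Spec_es_numero_espejo numero (es_numero_espejo numero)

-- ===== LEMMAS AND PROOFS =====

theorem pvBMirror_eq_pvAMirror (c : Char) : pvBMirror c = pvAMirror c := rfl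

-- the composition of A's loop, separated from the accumulator
def pvMapMirror : List Char → Option (List Char)
  | [] => some []
  | c :: rest =>
    match pvAMirror c with
    | some m => (pvMapMirror rest).map (m :: ·)
    | none => none

theorem pvALoop_eq_mapMirror (l acc : List Char) :
    pvALoop l acc = (pvMapMirror l).map (acc ++ ·) := by
  induction l generalizing acc with
  | nil => simp [pvALoop, pvMapMirror]
  | cons c rest ih =>
    simp only [pvALoop, pvMapMirror]
    cases pvAMirror c with
    | none => simp
    | some m =>
      simp only [ih]
      cases pvMapMirror rest <;> simp

theorem pvMapMirror_eq_some_iff (l t : List Char) :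
    pvMapMirror l = some t ↔
      t.length = l.length ∧ ∀ j, j < l.length →
        pvAMirror (l.getD j ' ') = some (t.getD j ' ') := by
  induction l generalizing t with
  | nil =>
    simp only [pvMapMirror, List.length_nil]
    constructor
    · intro h
      injection h with h
      subst h
      exact ⟨rfl, fun j hj => absurd hj (by omega)⟩
    · rintro ⟨hlen, -⟩
      rw [List.length_eq_zero_iff.mp hlen]
  | cons c rest ih =>
    simp only [pvMapMirror]
    cases hc : pvAMirror c with
    | none =>
      simp only [List.length_cons]
      constructor
      · intro h; cases h
      · rintro ⟨-, h⟩
        have := h 0 (Nat.succ_pos _)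
        simp [hc] at this
    | some m =>
      constructor
      · intro h
        obtain ⟨t', ht', rfl⟩ := Option.map_eq_some_iff.mp h
        obtain ⟨hlen, hpt⟩ := ih t' |>.mp ht'
        refine ⟨by simp [hlen], ?_⟩
        intro j hj
        cases j with
        | zero => simp [hc]
        | succ j' =>
          simpa using hpt j' (by simpa using hj)
      · rintro ⟨hlen, hpt⟩
        cases t with
        | nil => simp at hlen
        | cons d t' =>
          have h0 := hpt 0 (Nat.succ_pos _)
          simp [hc] at h0
          subst h0
          have ht' : pvMapMirror rest = some t' := by
            refine (ih t').mpr ⟨by simpa using hlen, ?_⟩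
            intro j hj
            simpa using hpt (j + 1) (by simpa using Nat.succ_lt_succ hj)
          simp [ht']

theorem pvBLoop_eq_true_iff (s : List Char) (n i : Nat) :
    pvBLoop s n i = true ↔
      ∀ j, i ≤ j → j < n →
        pvAMirror (s.getD (n - 1 - j) ' ') = some (s.getD j ' ') := by
  have key : ∀ k i, n - i ≤ k →
      (pvBLoop s n i = true ↔
        ∀ j, i ≤ j → j < n →
          pvAMirror (s.getD (n - 1 - j) ' ') = some (s.getD j ' ')) := by
    intro k
    induction k with
    | zero =>
      intro i hk
      rw [pvBLoop]
      have : ¬ i < n := by omega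
      simp only [this, if_false]
      constructor
      · intro _ j hij hjn; omega
      · intro _; trivial
    | succ k ih =>
      intro i hk
      rw [pvBLoop]
      by_cases hin : i < n
      · simp only [hin, if_true, pvBMirror_eq_pvAMirror]
        cases hc : pvAMirror (s.getD (n - 1 - i) ' ') with
        | none =>
          simp only []
          constructor
          · intro h; cases h
          · intro h
            have := h i le_rfl hin
            rw [hc] at this; cases this
        | some m =>
          simp only []
          by_cases hm : m = s.getD i ' '
          · simp only [hm, ne_eq, not_true_eq_false, if_false]
            rw [ih (i + 1) (by omega)]
            constructor
            · intro h j hij hjn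
              rcases Nat.eq_or_lt_of_le hij with rfl | hlt
              · rw [hc, hm]
              · exact h j hlt hjn
            · intro h j hij hjn
              exact h j (by omega) hjn
          · simp only [ne_eq, hm, not_false_iff, if_true]
            constructor
            · intro h; cases h
            · intro h
              have := h i le_rfl hin
              rw [hc] at this
              exact absurd (Option.some_injective _ this) hm
      · simp only [hin, if_false]
        constructor
        · intro _ j hij hjn; omega
        · intro _; trivial
  exact key (n - i) i le_rfl

theorem getD_reverse (l : List Char) (j : Nat) (hj : j < l.length) :
    l.reverse.getD j ' ' = l.getD (l.length - 1 - j) ' ' := by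
  rw [List.getD_eq_getElem _ _ (by simpa using hj),
      List.getD_eq_getElem _ _ (by omega),
      List.getElem_reverse]

theorem main_eq (s : List Char) :
    (match pvALoop s.reverse [] with
     | none => false
     | some r => r == s) = pvBLoop s s.length 0 := by
  rw [Bool.eq_iff_iff, pvBLoop_eq_true_iff, pvALoop_eq_mapMirror]
  have hall : (∀ j, 0 ≤ j → j < s.length →
      pvAMirror (s.getD (s.length - 1 - j) ' ') = some (s.getD j ' ')) →
      pvMapMirror s.reverse = some s := by
    intro h
    refine (pvMapMirror_eq_some_iff _ _).mpr ⟨by simp, ?_⟩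
    intro j hj
    have hj' : j < s.length := by simp at hj; exact hj
    rw [getD_reverse s j hj']
    exact h j (Nat.zero_le _) hj'
  cases hm : pvMapMirror s.reverse with
  | none =>
    simp only [Option.map_none]
    constructor
    · intro h; cases h
    · intro h
      exfalso
      have := hall h
      rw [hm] at this
      cases this
  | some r =>
    simp only [Option.map_some, List.nil_append, beq_iff_eq]
    constructor
    · intro hrs j _ hj
      rw [hrs] at hm
      have hp := ((pvMapMirror_eq_some_iff _ _).mp hm).2 j (by simpa using hj)
      rwa [getD_reverse s j hj] at hp
    · intro h
      have := hall h
      rw [hm] at this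
      injection this

-- ===== VERDICT (by name: the statement is the Claim_ definition above) =====
theorem es_numero_espejo_spec : Claim_equal_es_numero_espejo := by
  intro numero _
  unfold Spec_es_numero_espejo es_numero_espejo es_numero_espejo_alt
  exact main_eq ((PySem.Int.toStr numero).toList)
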